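-- pv_equiv track=rewrite | github.com/mohammadfaiizan/ProjectI | DSA/Problem/Queue_Stack/09_Competitive_Programming_Patterns/844_Backspace_String_Compare.py | backspaceCompare_stack
-- ===== SOURCE A (Python) =====
-- def backspaceCompare_stack(s: str, t: str) -> bool:
--     """
--     Approach 1: Stack Simulation (Optimal for readability)
--
--     Use stacks to simulate the typing process.
--
--     Time: O(n + m), Space: O(n + m)
--     """
--     def build_string(string: str) -> str:
--         stack = []
--         for char in string:
--             if char == '#':
--                 if stack:
--                     stack.pop()
--             else:
--                 stack.append(char)
--         return ''.join(stack)
--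
--     return build_string(s) == build_string(t)
-- ===== SOURCE B (Python) =====
-- def backspaceCompare_stack(s: str, t: str) -> bool:
--     # Backward scan with a skip counter: no stack is ever built; each string is
--     # reduced to its surviving characters (collected right-to-left) in one pass.
--     def survivors(string: str) -> list:
--         res = []
--         skip = 0
--         for ch in reversed(string):
--             if ch == '#':
--                 skip += 1
--             elif skip > 0:
--                 skip -= 1
--             else:
--                 res.append(ch)
--         return res  # survivors, rightmost first
--
--     return survivors(s) == survivors(t)
-- ===== Notes on version B (the rewrite author's own statement) =====
-- stated objective: alternative
-- what changed: Replaces the left-to-right stack simulation (push/pop then join and compare strings) by a single right-to-left scan per string that maintains a skip counter instead of a stack and compares the surviving characters directly, never joining a string.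
import Mathlib
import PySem

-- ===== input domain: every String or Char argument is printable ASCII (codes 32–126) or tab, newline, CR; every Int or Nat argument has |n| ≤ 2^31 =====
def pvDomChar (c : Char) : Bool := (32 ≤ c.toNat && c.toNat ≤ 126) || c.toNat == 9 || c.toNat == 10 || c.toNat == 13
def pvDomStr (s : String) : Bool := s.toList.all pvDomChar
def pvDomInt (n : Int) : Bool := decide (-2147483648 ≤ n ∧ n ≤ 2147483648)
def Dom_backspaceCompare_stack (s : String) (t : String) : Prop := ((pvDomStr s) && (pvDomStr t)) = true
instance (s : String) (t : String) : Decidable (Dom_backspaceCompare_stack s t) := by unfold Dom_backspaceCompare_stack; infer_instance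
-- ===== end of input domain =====

-- B replaces A's left-to-right stack simulation by a right-to-left scan with a
-- skip counter per string, comparing surviving characters directly (alternative
-- decomposition, same cost); return values proved equal on all inputs.


-- ===== PORT A =====
-- build_string: for char in string: '#' pops (if nonempty) else append; join.
def pvBuildString (string : List Char) : List Char :=
  string.foldl
    (fun stack char =>
      if char = '#' then (if stack.isEmpty then stack else stack.dropLast)
      else stack ++ [char]) []

def backspaceCompare_stack (s : String) (t : String) : Bool :=
  String.ofList (pvBuildString s.toList) == String.ofList (pvBuildString t.toList)

-- ===== PORT B =====
-- survivors: loop over reversed(string) with (res, skip) state; '#' bumps skip,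
-- a skipped char decrements it, otherwise the char is appended to res.
def pvSurvStep (st : List Char × Nat) (ch : Char) : List Char × Nat :=
  if ch = '#' then (st.1, st.2 + 1)
  else if st.2 > 0 then (st.1, st.2 - 1)
  else (st.1 ++ [ch], st.2)

def pvSurvivors (string : List Char) : List Char :=
  (string.reverse.foldl pvSurvStep ([], 0)).1

def backspaceCompare_stack_alt (s : String) (t : String) : Bool :=
  pvSurvivors s.toList == pvSurvivors t.toList

-- ===== PRECONDITION & SPEC =====
def Spec_backspaceCompare_stack (s : String) (t : String) (out : Bool) : Prop := out = backspaceCompare_stack_alt s t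
instance (s : String) (t : String) (out : Bool) : Decidable (Spec_backspaceCompare_stack s t out) := by unfold Spec_backspaceCompare_stack; infer_instance

-- ===== CLAIM (what is proved, stated in full; the proofs are below) =====
def Claim_equal_backspaceCompare_stack : Prop := ∀ (s : String) (t : String), Dom_backspaceCompare_stack s t → Spec_backspaceCompare_stack s t (backspaceCompare_stack s t)

-- ===== LEMMAS AND PROOFS =====

-- drop the last k elements
def pvDropEnd (k : Nat) (l : List Char) : List Char := l.take (l.length - k)

lemma pvDropEnd_zero (l : List Char) : pvDropEnd 0 l = l := by
  simp [pvDropEnd]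

lemma pvDropEnd_succ (k : Nat) (l : List Char) :
    pvDropEnd (k + 1) l = pvDropEnd k l.dropLast := by
  simp [pvDropEnd, List.dropLast_eq_take, List.take_take]
  omega

lemma pvDropEnd_append_pos (k : Nat) (l : List Char) (c : Char) (hk : 1 ≤ k) :
    pvDropEnd k (l ++ [c]) = pvDropEnd (k - 1) l := by
  simp only [pvDropEnd, List.length_append, List.length_singleton]
  rw [List.take_append_of_le_length (by omega)]
  congr 1
  omega

lemma pvBuildString_append (ds : List Char) (c : Char) :
    pvBuildString (ds ++ [c]) =
      (if c = '#' then (if (pvBuildString ds).isEmpty then pvBuildString ds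
                        else (pvBuildString ds).dropLast)
       else pvBuildString ds ++ [c]) := by
  simp [pvBuildString]

-- main invariant: the backward skip scan computes the stack result, reversed,
-- with the pending skip count removing that many characters from its end
lemma pvScan_eq_build (cs : List Char) :
    ∀ (res : List Char) (k : Nat),
      (cs.reverse.foldl pvSurvStep (res, k)).1
        = res ++ (pvDropEnd k (pvBuildString cs)).reverse := by
  induction cs using List.reverseRecOn with
  | nil =>
    intro res k
    simp [pvBuildString, pvDropEnd]
  | append_singleton ds c ih =>
    intro res k
    rw [List.reverse_append, List.reverse_singleton, List.singleton_append,
        List.foldl_cons, pvBuildString_append]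
    by_cases hc : c = '#'
    · have hstep : pvSurvStep (res, k) c = (res, k + 1) := by
        simp [pvSurvStep, hc]
      rw [hstep, ih res (k + 1), hc]
      by_cases he : (pvBuildString ds).isEmpty
      · have : pvBuildString ds = [] := by
          simpa [List.isEmpty_iff] using he
        simp [this, pvDropEnd]
      · simp [he, pvDropEnd_succ]
    · by_cases hk : 0 < k
      · have hstep : pvSurvStep (res, k) c = (res, k - 1) := by
          simp [pvSurvStep, hc, hk]
        rw [hstep, ih res (k - 1)]
        simp [hc, pvDropEnd_append_pos k _ c hk]
      · have hk0 : k = 0 := by omega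
        have hstep : pvSurvStep (res, k) c = (res ++ [c], k) := by
          simp [pvSurvStep, hc, hk0]
        rw [hstep, ih (res ++ [c]) k, hk0]
        simp [hc, pvDropEnd_zero]

lemma pvSurvivors_eq (cs : List Char) :
    pvSurvivors cs = (pvBuildString cs).reverse := by
  simpa [pvSurvivors, pvDropEnd_zero] using pvScan_eq_build cs [] 0

-- ===== VERDICT (by name: the statement is the Claim_ definition above) =====
theorem backspaceCompare_stack_spec : Claim_equal_backspaceCompare_stack := by
  intro s t _
  unfold Spec_backspaceCompare_stack backspaceCompare_stack backspaceCompare_stack_alt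
  rw [pvSurvivors_eq, pvSurvivors_eq]
  by_cases h : pvBuildString s.toList = pvBuildString t.toList
  · simp [h]
  · have h2 : ¬ (pvBuildString s.toList).reverse = (pvBuildString t.toList).reverse := by
      simpa [List.reverse_inj] using h
    have hm : String.ofList (pvBuildString s.toList) ≠ String.ofList (pvBuildString t.toList) := by
      intro he
      exact h (by simpa [String.toList_ofList] using congrArg String.toList he)
    simp [hm, h2]
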